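-- pv_equiv track=rewrite | github.com/womri1998/ProjectEuler100s | problem125.py | sums_of_squares
-- ===== SOURCE A (Python) =====
-- def sums_of_squares(n):
--     i = 2
--     res = []
--     while i ** 2 + (i - 1) ** 2 < n:
--         s = i ** 2 + (i - 1) ** 2
--         j = i
--         while s < n:
--             insert(res, s)
--             j += 1
--             s += j ** 2
--         i += 1
--     return res
--
-- def insert(arr, n):
--     l, h = 0, len(arr)
--     while l < h:
--         m = (l + h) // 2
--         if arr[m] < n:
--             l = m + 1
--         elif arr[m] > n:
--             h = m
--         else:
--             return
--     return arr.insert(h, n)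
-- ===== SOURCE B (Python) =====
-- def sums_of_squares(n):
--     # Largest end index K with (K-1)^2 + K^2 < n (K == 1 means no window fits).
--     K = 1
--     while (K + 1) ** 2 + K ** 2 < n:
--         K += 1
--     # Prefix sums of squares: P[k] = 1^2 + ... + k^2.
--     P = [0] * (K + 1)
--     for k in range(1, K + 1):
--         P[k] = P[k - 1] + k * k
--     sums = set()
--     for a in range(1, K):
--         for b in range(a + 1, K + 1):
--             s = P[b] - P[a - 1]
--             if s >= n:
--                 break
--             sums.add(s)
--     return sorted(sums)
-- ===== Notes on version B (the rewrite author's own statement) =====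
-- stated objective: faster
-- what changed: Replaces A's running-sum accumulator plus hand-written binary-search list insertion with a precomputed prefix-sum table of squares queried by subtraction, a hash set collecting the window sums, and one final sort.
import Mathlib
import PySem

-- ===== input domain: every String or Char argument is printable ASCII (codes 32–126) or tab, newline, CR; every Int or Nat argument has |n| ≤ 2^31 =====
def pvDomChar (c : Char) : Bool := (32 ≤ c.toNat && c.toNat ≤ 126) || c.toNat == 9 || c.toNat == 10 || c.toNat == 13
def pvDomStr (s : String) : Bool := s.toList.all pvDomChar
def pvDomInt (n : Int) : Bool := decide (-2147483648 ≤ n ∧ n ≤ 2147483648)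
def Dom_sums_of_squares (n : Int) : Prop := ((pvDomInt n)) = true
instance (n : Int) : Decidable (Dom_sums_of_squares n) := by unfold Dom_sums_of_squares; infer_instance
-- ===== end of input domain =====

-- B replaces A's running-sum accumulator + hand-written binary-search list insertion by a
-- prefix-sum table queried by subtraction, a set of the window sums, and one final sort (faster).

-- ===== PORT A =====
-- termination measures of the Python while-loops, proved once and cited by name
theorem pvInsLoopDec1 (l h : Nat) (h1 : l < h) : h - ((l + h) / 2 + 1) < h - l :=
  Nat.sub_lt_sub_left h1 (Nat.lt_succ_of_le ((Nat.le_div_iff_mul_le Nat.zero_lt_two).mpr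
    (by rw [Nat.mul_two]; exact Nat.add_le_add_left (Nat.le_of_lt h1) l)))

theorem pvInsLoopDec2 (l h : Nat) (h1 : l < h) : (l + h) / 2 - l < h - l :=
  Nat.sub_lt_sub_right ((Nat.le_div_iff_mul_le Nat.zero_lt_two).mpr
      (by rw [Nat.mul_two]; exact Nat.add_le_add_left (Nat.le_of_lt h1) l))
    ((Nat.div_lt_iff_lt_mul Nat.zero_lt_two).mpr
      (by rw [Nat.mul_two]; exact Nat.add_lt_add_right h1 h))

theorem pvInnerADec (n s : Int) (j : Nat) (h : s < n) :
    (n - (s + ((j : Int) + 1) ^ 2)).toNat < (n - s).toNat :=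
  (Int.toNat_lt_toNat (Int.sub_pos.mpr h)).mpr
    (sub_lt_sub_left (lt_add_of_pos_right s
      (pow_pos (add_pos_of_nonneg_of_pos (Int.natCast_nonneg j) one_pos) 2)) n)

theorem pvSqKey (x : Int) (hx : 0 ≤ x) : (x + 1) ^ 2 + x ^ 2 < (x + 1 + 1) ^ 2 + (x + 1) ^ 2 :=
  add_lt_add_of_le_of_lt
    (le_of_lt (pow_lt_pow_left₀ (lt_add_one (x + 1)) (add_nonneg hx zero_le_one) two_ne_zero))
    (pow_lt_pow_left₀ (lt_add_one x) hx two_ne_zero)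

theorem pvOuterADec (n : Int) (i : Nat) (h : (i : Int) ^ 2 + ((i : Int) - 1) ^ 2 < n) :
    (n - (((i + 1 : Nat) : Int) ^ 2 + (((i + 1 : Nat) : Int) - 1) ^ 2)).toNat + (2 - (i + 1))
      < (n - ((i : Int) ^ 2 + ((i : Int) - 1) ^ 2)).toNat + (2 - i) := by
  cases i with
  | zero =>
    rw [show (((0 + 1 : Nat) : Int) ^ 2 + (((0 + 1 : Nat) : Int) - 1) ^ 2)
        = (((0 : Nat) : Int) ^ 2 + (((0 : Nat) : Int) - 1) ^ 2) from by decide]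
    exact Nat.add_lt_add_left (by decide) _
  | succ m =>
    simp only [Nat.cast_succ] at h ⊢
    simp only [add_sub_cancel_right] at h ⊢
    exact Nat.add_lt_add_of_lt_of_le
      ((Int.toNat_lt_toNat (Int.sub_pos.mpr h)).mpr
        (sub_lt_sub_left (pvSqKey (m : Int) (Int.natCast_nonneg m)) n))
      (Nat.sub_le_sub_left (Nat.le_succ (m + 1)) 2)

theorem pvKLoopDec (n : Int) (K : Nat) (h : ((K : Int) + 1) ^ 2 + (K : Int) ^ 2 < n) :
    (n - ((((K + 1 : Nat) : Int) + 1) ^ 2 + ((K + 1 : Nat) : Int) ^ 2)).toNat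
      < (n - (((K : Int) + 1) ^ 2 + (K : Int) ^ 2)).toNat := by
  rw [Nat.cast_succ]
  exact (Int.toNat_lt_toNat (Int.sub_pos.mpr h)).mpr
    (sub_lt_sub_left (pvSqKey (K : Int) (Int.natCast_nonneg K)) n)

-- A's helper `insert`: binary-search position, skip duplicates. Python's l, h, m are
-- nonnegative ints throughout; they are ported as Nat (same values on every reachable state).
def pvInsLoop (arr : List Int) (v : Int) (l h : Nat) : List Int :=
  if _hlt : l < h then
    let m := (l + h) / 2
    if PySem.List.pyGetD arr (m : Int) 0 < v then pvInsLoop arr v (m + 1) h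
    else if PySem.List.pyGetD arr (m : Int) 0 > v then pvInsLoop arr v l m
    else arr
  else PySem.List.insert arr (h : Int) v
termination_by h - l
decreasing_by
  · exact pvInsLoopDec1 l h _hlt
  · exact pvInsLoopDec2 l h _hlt

def pvInsert (arr : List Int) (v : Int) : List Int := pvInsLoop arr v 0 arr.length

-- inner `while s < n` loop; Python's j equals the outer i ≥ 2 plus increments, ported as Nat.
def pvInnerA (n : Int) (res : List Int) (j : Nat) (s : Int) : List Int :=
  if _h : s < n then pvInnerA n (pvInsert res s) (j + 1) (s + ((j : Int) + 1) ^ 2) else res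
termination_by (n - s).toNat
decreasing_by exact pvInnerADec n s j _h

-- outer `while i ** 2 + (i - 1) ** 2 < n` loop; i starts at 2, ported as Nat.
def pvOuterA (n : Int) (i : Nat) (res : List Int) : List Int :=
  if _h : (i : Int) ^ 2 + ((i : Int) - 1) ^ 2 < n then
    pvOuterA n (i + 1) (pvInnerA n res i ((i : Int) ^ 2 + ((i : Int) - 1) ^ 2))
  else res
termination_by (n - ((i : Int) ^ 2 + ((i : Int) - 1) ^ 2)).toNat + (2 - i)
decreasing_by exact pvOuterADec n i _h

def sums_of_squares (n : Int) : List Int := pvOuterA n 2 []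

-- ===== PORT B =====
-- `while (K + 1) ** 2 + K ** 2 < n: K += 1`; K starts at 1, ported as Nat.
def pvKLoop (n : Int) (K : Nat) : Nat :=
  if _h : ((K : Int) + 1) ^ 2 + (K : Int) ^ 2 < n then pvKLoop n (K + 1) else K
termination_by (n - (((K : Int) + 1) ^ 2 + (K : Int) ^ 2)).toNat
decreasing_by exact pvKLoopDec n K _h

-- one step of `P[k] = P[k - 1] + k * k`
def pvStepP (P : List Int) (k : Int) : List Int :=
  PySem.List.pySetD P k (PySem.List.pyGetD P (k - 1) 0 + k * k)

-- `for b in range(a + 1, K + 1): s = P[b] - P[a-1]; if s >= n: break; sums.add(s)`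
def pvInnerB (n : Int) (P : List Int) (a : Int) : List Int → PySem.Set Int → PySem.Set Int
  | [], sums => sums
  | b :: rest, sums =>
    if PySem.List.pyGetD P b 0 - PySem.List.pyGetD P (a - 1) 0 ≥ n then sums
    else pvInnerB n P a rest
      (PySem.Set.add sums (PySem.List.pyGetD P b 0 - PySem.List.pyGetD P (a - 1) 0))

def sums_of_squares_alt (n : Int) : List Int :=
  let K := pvKLoop n 1
  let P := (PySem.List.pyRange 1 ((K : Int) + 1) 1).foldl pvStepP (List.replicate (K + 1) 0)
  let sums := (PySem.List.pyRange 1 (K : Int) 1).foldl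
    (fun sums a => pvInnerB n P a (PySem.List.pyRange (a + 1) ((K : Int) + 1) 1) sums)
    PySem.Set.empty
  PySem.List.sorted sums (fun x => x) false

-- ===== PRECONDITION & SPEC =====
def Spec_sums_of_squares (n : Int) (out : List Int) : Prop := out = sums_of_squares_alt n
instance (n : Int) (out : List Int) : Decidable (Spec_sums_of_squares n out) := by unfold Spec_sums_of_squares; infer_instance

-- ===== CLAIM (what is proved, stated in full; the proofs are below) =====
def Claim_equal_sums_of_squares : Prop := ∀ (n : Int), Dom_sums_of_squares n → Spec_sums_of_squares n (sums_of_squares n)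

-- ===== LEMMAS AND PROOFS =====

-- SS k = 1^2 + 2^2 + ... + k^2
def SS : Nat → Int
  | 0 => 0
  | k + 1 => SS k + ((k : Int) + 1) ^ 2

-- the set both programs compute: sums of ≥ 2 consecutive squares (starting at (c+1)^2) below n
def InS (n x : Int) : Prop := ∃ c b : Nat, c + 2 ≤ b ∧ x = SS b - SS c ∧ x < n

theorem SS_mono {a b : Nat} (h : a ≤ b) : SS a ≤ SS b := by
  induction b with
  | zero => simp_all
  | succ b ih =>
    rcases Nat.lt_or_ge a (b + 1) with h' | h'
    · have := ih (by omega)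
      have : (0:Int) ≤ ((b : Int) + 1) ^ 2 := by positivity
      simp only [SS]; omega
    · have : a = b + 1 := by omega
      simp [this]

theorem pairwise_getElem_lt {arr : List Int} (hp : arr.Pairwise (· < ·))
    {p q : Nat} (hpq : p ≤ q) (hq : q < arr.length) : arr[p]'(by omega) ≤ arr[q] := by
  rcases Nat.lt_or_ge p q with h | h
  · exact le_of_lt ((List.pairwise_iff_getElem.mp hp) p q (by omega) hq h)
  · have : p = q := by omega
    subst this; rfl

theorem pvInsLoop_spec (arr : List Int) (v : Int) (l h : Nat) (hp : arr.Pairwise (· < ·)) :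
    l ≤ h → h ≤ arr.length →
    (∀ k, (hk : k < arr.length) → k < l → arr[k] < v) →
    (∀ k, (hk : k < arr.length) → h ≤ k → v < arr[k]) →
    (pvInsLoop arr v l h).Pairwise (· < ·) ∧
      ∀ x, x ∈ pvInsLoop arr v l h ↔ x ∈ arr ∨ x = v := by
  fun_induction pvInsLoop arr v l h with
  | case1 l h hlt m hcond ih =>
    intro hlh hhl hl hr
    have hm : m < arr.length := by omega
    have ham : PySem.List.pyGetD arr (m : Int) 0 = arr[m] := by
      rw [PySem.List.pyGetD_natCast]
      exact List.getD_eq_getElem arr 0 hm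
    refine ih (by omega) hhl ?_ hr
    intro k hk hkm
    calc arr[k] ≤ arr[m] := pairwise_getElem_lt hp (by omega) hm
    _ < v := by rw [← ham]; exact hcond
  | case2 l h hlt m hc1 hc2 ih =>
    intro hlh hhl hl hr
    have hm : m < arr.length := by omega
    have ham : PySem.List.pyGetD arr (m : Int) 0 = arr[m] := by
      rw [PySem.List.pyGetD_natCast]
      exact List.getD_eq_getElem arr 0 hm
    refine ih (by omega) (by omega) hl ?_
    intro k hk hkm
    calc v < arr[m] := by rw [← ham]; exact hc2
    _ ≤ arr[k] := pairwise_getElem_lt hp hkm hk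
  | case3 l h hlt m hc1 hc2 =>
    intro hlh hhl hl hr
    have hm : m < arr.length := by omega
    have ham : PySem.List.pyGetD arr (m : Int) 0 = arr[m] := by
      rw [PySem.List.pyGetD_natCast]
      exact List.getD_eq_getElem arr 0 hm
    have hveq : v = arr[m] := by rw [← ham]; omega
    refine ⟨hp, fun x => ?_⟩
    constructor
    · exact fun hx => Or.inl hx
    · rintro (hx | rfl)
      · exact hx
      · rw [hveq]; exact List.getElem_mem hm
  | case4 l h hlt =>
    intro hlh hhl hl hr
    have heq : PySem.List.insert arr (h : Int) v = arr.take h ++ v :: arr.drop h :=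
      PySem.List.insert_natCast arr h v hhl
    rw [heq]
    have htk : ∀ x ∈ arr.take h, x < v := by
      intro x hx
      obtain ⟨k, hk, rfl⟩ := List.mem_iff_getElem.mp hx
      rw [List.getElem_take]
      have hkh : k < h := by
        have := List.length_take_le h arr
        omega
      exact hl k (by omega) (by omega)
    have hdr : ∀ y ∈ arr.drop h, v < y := by
      intro y hy
      obtain ⟨k, hk, rfl⟩ := List.mem_iff_getElem.mp hy
      rw [List.getElem_drop]
      exact hr (h + k) (by simp at hk; omega) (by omega)
    constructor
    · rw [List.pairwise_append]
      refine ⟨hp.sublist (List.take_sublist h arr), ?_, ?_⟩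
      · rw [List.pairwise_cons]
        exact ⟨hdr, hp.sublist (List.drop_sublist h arr)⟩
      · intro x hx y hy
        rcases List.mem_cons.mp hy with rfl | hy'
        · exact htk x hx
        · exact lt_trans (htk x hx) (hdr y hy')
    · intro x
      constructor
      · intro hx
        rcases List.mem_append.mp hx with hx' | hx'
        · exact Or.inl (List.take_subset h arr hx')
        · rcases List.mem_cons.mp hx' with rfl | hx''
          · exact Or.inr rfl
          · exact Or.inl (List.drop_subset h arr hx'')
      · rintro (hx | rfl)
        · rw [← List.take_append_drop h arr] at hx
          rcases List.mem_append.mp hx with hx' | hx'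
          · exact List.mem_append.mpr (Or.inl hx')
          · exact List.mem_append.mpr (Or.inr (List.mem_cons_of_mem v hx'))
        · exact List.mem_append.mpr (Or.inr (List.mem_cons_self))

theorem pvInsert_spec (arr : List Int) (v : Int) (hp : arr.Pairwise (· < ·)) :
    (pvInsert arr v).Pairwise (· < ·) ∧ ∀ x, x ∈ pvInsert arr v ↔ x ∈ arr ∨ x = v := by
  unfold pvInsert
  exact pvInsLoop_spec arr v 0 arr.length hp (by omega) (le_refl _)
    (fun k hk h0 => by omega) (fun k hk hlen => by omega)

theorem SS_succ (j : Nat) : SS (j + 1) = SS j + ((j : Int) + 1) ^ 2 := rfl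

theorem pvInnerA_spec (n : Int) (res : List Int) (j : Nat) (s : Int) :
    res.Pairwise (· < ·) →
    (pvInnerA n res j s).Pairwise (· < ·) ∧
      ∀ x, x ∈ pvInnerA n res j s ↔ x ∈ res ∨ ∃ t : Nat, x = s + (SS (j + t) - SS j) ∧ x < n := by
  fun_induction pvInnerA n res j s with
  | case1 res j s hsn ih =>
    intro hp
    obtain ⟨hip, him⟩ := pvInsert_spec res s hp
    obtain ⟨hq, hmq⟩ := ih hip
    refine ⟨hq, fun x => ?_⟩
    rw [hmq x]
    constructor
    · rintro (hx | ⟨t, rfl, hxn⟩)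
      · rcases (him x).mp hx with hx' | rfl
        · exact Or.inl hx'
        · exact Or.inr ⟨0, by simp, hsn⟩
      · refine Or.inr ⟨t + 1, ?_, hxn⟩
        have : j + 1 + t = j + (t + 1) := by omega
        rw [this] at *
        rw [SS_succ]
        ring
    · rintro (hx | ⟨t, rfl, hxn⟩)
      · exact Or.inl ((him x).mpr (Or.inl hx))
      · cases t with
        | zero => exact Or.inl ((him _).mpr (Or.inr (by simp)))
        | succ u =>
          refine Or.inr ⟨u, ?_, hxn⟩
          have : j + (u + 1) = j + 1 + u := by omega
          rw [this, SS_succ]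
          ring
  | case2 res j s hsn =>
    intro hp
    refine ⟨hp, fun x => ?_⟩
    constructor
    · exact fun hx => Or.inl hx
    · rintro (hx | ⟨t, rfl, hxn⟩)
      · exact hx
      · have := SS_mono (Nat.le_add_right j t)
        omega

theorem SS_sub_lower (c b : Nat) (h : c + 2 ≤ b) :
    ((c : Int) + 1) ^ 2 + ((c : Int) + 2) ^ 2 ≤ SS b - SS c := by
  have h1 : SS (c + 2) ≤ SS b := SS_mono h
  have h2 : SS (c + 2) = SS c + ((c : Int) + 1) ^ 2 + ((c : Int) + 2) ^ 2 := by
    rw [SS_succ, SS_succ]; push_cast; ring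
  omega

theorem pvOuterA_spec (n : Int) (i : Nat) (res : List Int) :
    2 ≤ i → res.Pairwise (· < ·) →
    (pvOuterA n i res).Pairwise (· < ·) ∧
      ∀ x, x ∈ pvOuterA n i res ↔
        x ∈ res ∨ ∃ c b : Nat, i ≤ c + 2 ∧ c + 2 ≤ b ∧ x = SS b - SS c ∧ x < n := by
  fun_induction pvOuterA n i res with
  | case1 i res hcond ih =>
    intro hi hp
    obtain ⟨c0, rfl⟩ : ∃ c0, i = c0 + 2 := ⟨i - 2, by omega⟩
    have hs0 : ((c0 + 2 : Nat) : Int) ^ 2 + (((c0 + 2 : Nat) : Int) - 1) ^ 2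
        = SS (c0 + 2) - SS c0 := by
      rw [SS_succ, SS_succ]; push_cast; ring
    obtain ⟨hip, him⟩ := pvInnerA_spec n res (c0 + 2)
      (((c0 + 2 : Nat) : Int) ^ 2 + (((c0 + 2 : Nat) : Int) - 1) ^ 2) hp
    obtain ⟨hq, hmq⟩ := ih (by omega) hip
    refine ⟨hq, fun x => ?_⟩
    rw [hmq x, him x]
    constructor
    · rintro ((hx | ⟨t, rfl, hxn⟩) | ⟨c, b, hc, hcb, rfl, hxn⟩)
      · exact Or.inl hx
      · refine Or.inr ⟨c0, c0 + 2 + t, by omega, by omega, ?_, hxn⟩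
        rw [hs0]; ring
      · exact Or.inr ⟨c, b, by omega, hcb, rfl, hxn⟩
    · rintro (hx | ⟨c, b, hc, hcb, rfl, hxn⟩)
      · exact Or.inl (Or.inl hx)
      · rcases Nat.eq_or_lt_of_le hc with hceq | hclt
        · have hcc : c = c0 := by omega
          subst hcc
          refine Or.inl (Or.inr ⟨b - (c + 2), ?_, hxn⟩)
          have hb : c + 2 + (b - (c + 2)) = b := by omega
          rw [hb, hs0]; ring
        · exact Or.inr ⟨c, b, by omega, hcb, rfl, hxn⟩
  | case2 i res hcond =>
    intro hi hp
    refine ⟨hp, fun x => ?_⟩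
    constructor
    · exact fun hx => Or.inl hx
    · rintro (hx | ⟨c, b, hc, hcb, rfl, hxn⟩)
      · exact hx
      · exfalso
        have hlow := SS_sub_lower c b hcb
        have hic : (i : Int) ≤ (c : Int) + 2 := by exact_mod_cast hc
        have hi2 : (2 : Int) ≤ (i : Int) := by exact_mod_cast hi
        have h1 : ((i : Int) - 1) ^ 2 ≤ ((c : Int) + 1) ^ 2 := by nlinarith
        have h2 : (i : Int) ^ 2 ≤ ((c : Int) + 2) ^ 2 := by nlinarith
        push Not at hcond
        omega

theorem sums_of_squares_A_char (n : Int) :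
    (sums_of_squares n).Pairwise (· < ·) ∧
      ∀ x, x ∈ sums_of_squares n ↔ InS n x := by
  obtain ⟨hq, hm⟩ := pvOuterA_spec n 2 [] (le_refl 2) List.Pairwise.nil
  refine ⟨hq, fun x => ?_⟩
  rw [show sums_of_squares n = pvOuterA n 2 [] from rfl, hm x]
  unfold InS
  simp only [List.not_mem_nil, false_or]
  constructor
  · rintro ⟨c, b, _, hcb, rfl, hxn⟩; exact ⟨c, b, hcb, rfl, hxn⟩
  · rintro ⟨c, b, hcb, rfl, hxn⟩; exact ⟨c, b, by omega, hcb, rfl, hxn⟩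

theorem pvKLoop_final (n : Int) (K0 : Nat) :
    ¬ (((pvKLoop n K0 : Int) + 1) ^ 2 + (pvKLoop n K0 : Int) ^ 2 < n) := by
  fun_induction pvKLoop n K0 with
  | case1 K hcond ih => exact ih
  | case2 K hcond => exact hcond

theorem pvKLoop_ge (n : Int) (K0 : Nat) : K0 ≤ pvKLoop n K0 := by
  fun_induction pvKLoop n K0 with
  | case1 K hcond ih => omega
  | case2 K hcond => omega

-- the prefix table built by B: after processing k = 1..m, entry k holds SS k (k ≤ m)
theorem pvBuildP_spec (K : Nat) : ∀ (m : Nat), m ≤ K → ∀ (P0 : List Int),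
    P0.length = K + 1 → PySem.List.pyGetD P0 0 0 = 0 →
    ((PySem.List.pyRange 1 ((m : Int) + 1) 1).foldl pvStepP P0).length = K + 1 ∧
      ∀ k : Nat, k ≤ m →
        PySem.List.pyGetD ((PySem.List.pyRange 1 ((m : Int) + 1) 1).foldl pvStepP P0) (k : Int) 0
          = SS k := by
  intro m
  induction m with
  | zero =>
    intro _ P0 hlen h0
    rw [PySem.List.pyRange_one_eq_nil (by omega)]
    simp only [List.foldl_nil]
    refine ⟨hlen, fun k hk => ?_⟩
    have : k = 0 := by omega
    subst this
    simpa [SS] using h0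
  | succ m ih =>
    intro hmK P0 hlen h0
    obtain ⟨ihlen, ihget⟩ := ih (by omega) P0 hlen h0
    have hsingle : PySem.List.pyRange ((m : Int) + 1) ((m : Int) + 1 + 1) 1 = [(m : Int) + 1] := by
      rw [PySem.List.pyRange_one_cons (by omega)]
      rw [PySem.List.pyRange_one_eq_nil (by omega)]
    have hsplit : PySem.List.pyRange 1 ((m : Int) + 1 + 1) 1
        = PySem.List.pyRange 1 ((m : Int) + 1) 1 ++ [(m : Int) + 1] := by
      rw [PySem.List.pyRange_one_append 1 ((m : Int) + 1) ((m : Int) + 1 + 1) (by omega) (by omega),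
        hsingle]
    have hcast : (((m + 1 : Nat) : Int) + 1) = ((m : Int) + 1 + 1) := by push_cast; ring
    rw [hcast, hsplit, List.foldl_append]
    simp only [List.foldl_cons, List.foldl_nil]
    have hstep : pvStepP ((PySem.List.pyRange 1 ((m : Int) + 1) 1).foldl pvStepP P0) ((m : Int) + 1)
        = PySem.List.pySetD ((PySem.List.pyRange 1 ((m : Int) + 1) 1).foldl pvStepP P0)
            (((m + 1 : Nat) : Int)) (SS m + ((m : Int) + 1) * ((m : Int) + 1)) := by
      rw [pvStepP]
      have h1 : (m : Int) + 1 - 1 = ((m : Nat) : Int) := by ring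
      rw [h1, ihget m (le_refl m)]
      push_cast
      ring_nf
    rw [hstep]
    have hlt : m + 1 < ((PySem.List.pyRange 1 ((m : Int) + 1) 1).foldl pvStepP P0).length := by
      omega
    constructor
    · rw [PySem.List.length_pySetD]
      exact ihlen
    · intro k hk
      rw [PySem.List.pyGetD_pySetD_natCast _ _ _ _ _ hlt]
      rcases Nat.eq_or_lt_of_le hk with hkeq | hklt
      · subst hkeq
        rw [if_pos rfl]
        rw [SS_succ]; ring
      · rw [if_neg (by omega)]
        exact ihget k (by omega)

theorem pvInnerB_spec (n : Int) (P : List Int) (K : Nat)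
    (hP : ∀ k : Nat, k ≤ K → PySem.List.pyGetD P (k : Int) 0 = SS k) (c : Nat) (hcK : c ≤ K) :
    ∀ (d b0 : Nat), b0 + d = K + 1 → c + 2 ≤ b0 → ∀ (sums : PySem.Set Int), sums.Nodup →
      (pvInnerB n P ((c : Int) + 1) (PySem.List.pyRange (b0 : Int) ((K : Int) + 1) 1) sums).Nodup ∧
      ∀ x, x ∈ pvInnerB n P ((c : Int) + 1) (PySem.List.pyRange (b0 : Int) ((K : Int) + 1) 1) sums ↔
        x ∈ sums ∨ ∃ b : Nat, b0 ≤ b ∧ b ≤ K ∧ x = SS b - SS c ∧ x < n := by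
  intro d
  induction d with
  | zero =>
    intro b0 hb0 hcb0 sums hns
    rw [PySem.List.pyRange_one_eq_nil (by omega)]
    simp only [pvInnerB]
    refine ⟨hns, fun x => ?_⟩
    constructor
    · exact fun hx => Or.inl hx
    · rintro (hx | ⟨b, hb1, hb2, _, _⟩)
      · exact hx
      · omega
  | succ d ih =>
    intro b0 hb0 hcb0 sums hns
    rw [PySem.List.pyRange_one_cons (by omega)]
    simp only [pvInnerB]
    have hc1 : (c : Int) + 1 - 1 = ((c : Nat) : Int) := by ring
    rw [hc1, hP c (by omega), hP b0 (by omega)]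
    by_cases hge : SS b0 - SS c ≥ n
    · rw [if_pos hge]
      refine ⟨hns, fun x => ?_⟩
      constructor
      · exact fun hx => Or.inl hx
      · rintro (hx | ⟨b, hb1, hb2, rfl, hxn⟩)
        · exact hx
        · have := SS_mono (show b0 ≤ b by omega)
          omega
    · rw [if_neg hge]
      have hcast : ((b0 : Int) + 1) = (((b0 + 1 : Nat) : Int)) := by push_cast; ring
      rw [hcast]
      obtain ⟨hq, hmq⟩ := ih (b0 + 1) (by omega) (by omega)
        (PySem.Set.add sums (SS b0 - SS c)) (PySem.Set.nodup_add sums _ hns)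
      refine ⟨hq, fun x => ?_⟩
      rw [hmq x, PySem.Set.mem_add]
      constructor
      · rintro ((hx | rfl) | ⟨b, hb1, hb2, rfl, hxn⟩)
        · exact Or.inl hx
        · exact Or.inr ⟨b0, by omega, by omega, rfl, by omega⟩
        · exact Or.inr ⟨b, by omega, hb2, rfl, hxn⟩
      · rintro (hx | ⟨b, hb1, hb2, rfl, hxn⟩)
        · exact Or.inl (Or.inl hx)
        · rcases Nat.eq_or_lt_of_le hb1 with hbeq | hblt
          · subst hbeq
            exact Or.inl (Or.inr rfl)
          · exact Or.inr ⟨b, by omega, hb2, rfl, hxn⟩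

theorem pvFoldB_spec (n : Int) (P : List Int) (K : Nat)
    (hP : ∀ k : Nat, k ≤ K → PySem.List.pyGetD P (k : Int) 0 = SS k) :
    ∀ (d c0 : Nat), c0 + 1 + d = K → ∀ (sums : PySem.Set Int), sums.Nodup →
      ((PySem.List.pyRange ((c0 : Int) + 1) (K : Int) 1).foldl
        (fun sums a => pvInnerB n P a (PySem.List.pyRange (a + 1) ((K : Int) + 1) 1) sums)
        sums).Nodup ∧
      ∀ x, x ∈ (PySem.List.pyRange ((c0 : Int) + 1) (K : Int) 1).foldl
          (fun sums a => pvInnerB n P a (PySem.List.pyRange (a + 1) ((K : Int) + 1) 1) sums)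
          sums ↔
        x ∈ sums ∨ ∃ c b : Nat, c0 ≤ c ∧ c + 2 ≤ b ∧ b ≤ K ∧ x = SS b - SS c ∧ x < n := by
  intro d
  induction d with
  | zero =>
    intro c0 hc0 sums hns
    rw [PySem.List.pyRange_one_eq_nil (by omega)]
    simp only [List.foldl_nil]
    refine ⟨hns, fun x => ?_⟩
    constructor
    · exact fun hx => Or.inl hx
    · rintro (hx | ⟨c, b, hc, hcb, hbK, _, _⟩)
      · exact hx
      · omega
  | succ d ih =>
    intro c0 hc0 sums hns
    rw [PySem.List.pyRange_one_cons (by omega)]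
    simp only [List.foldl_cons]
    obtain ⟨hq1, hmq1⟩ := pvInnerB_spec n P K hP c0 (by omega) (d + 1) (c0 + 2) (by omega)
      (by omega) sums hns
    push_cast at hq1 hmq1
    have hr : ((c0 : Int) + 1 + 1) = ((c0 : Int) + 2) := by ring
    rw [hr]
    obtain ⟨hq2, hmq2⟩ := ih (c0 + 1) (by omega) _ hq1
    push_cast at hq2 hmq2
    rw [hr] at hq2 hmq2
    refine ⟨hq2, fun x => ?_⟩
    rw [hmq2 x, hmq1 x]
    constructor
    · rintro ((hx | ⟨b, hb1, hb2, rfl, hxn⟩) | ⟨c, b, hc, hcb, hbK, rfl, hxn⟩)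
      · exact Or.inl hx
      · exact Or.inr ⟨c0, b, le_refl c0, hb1, hb2, rfl, hxn⟩
      · exact Or.inr ⟨c, b, by omega, hcb, hbK, rfl, hxn⟩
    · rintro (hx | ⟨c, b, hc, hcb, hbK, rfl, hxn⟩)
      · exact Or.inl (Or.inl hx)
      · rcases Nat.eq_or_lt_of_le hc with hceq | hclt
        · subst hceq
          exact Or.inl (Or.inr ⟨b, hcb, hbK, rfl, hxn⟩)
        · exact Or.inr ⟨c, b, by omega, hcb, hbK, rfl, hxn⟩

theorem SS_sub_lower_top (c b : Nat) (h : c + 2 ≤ b) :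
    ((b : Int) - 1) ^ 2 + (b : Int) ^ 2 ≤ SS b - SS c := by
  obtain ⟨m, rfl⟩ : ∃ m, b = m + 2 := ⟨b - 2, by omega⟩
  have h1 : SS c ≤ SS m := SS_mono (by omega)
  have h2 : SS (m + 2) = SS m + ((m : Int) + 1) ^ 2 + ((m : Int) + 2) ^ 2 := by
    rw [SS_succ, SS_succ]; push_cast; ring
  have h3 : ((m + 2 : Nat) : Int) - 1 = (m : Int) + 1 := by push_cast; ring
  have h4 : ((m + 2 : Nat) : Int) = (m : Int) + 2 := by push_cast; ring
  rw [h3, h4]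
  omega

theorem sums_of_squares_spec : Claim_equal_sums_of_squares := by
  intro n _
  unfold Spec_sums_of_squares
  obtain ⟨hpA, hmA⟩ := sums_of_squares_A_char n
  have hK1 : 1 ≤ pvKLoop n 1 := pvKLoop_ge n 1
  have hKfin := pvKLoop_final n 1
  obtain ⟨hlenP, hgetP⟩ := pvBuildP_spec (pvKLoop n 1) (pvKLoop n 1) (le_refl _)
    (List.replicate (pvKLoop n 1 + 1) 0) (by simp)
    (by rw [show (0 : Int) = ((0 : Nat) : Int) from rfl, PySem.List.pyGetD_natCast]; simp)
  obtain ⟨hnB, hmB⟩ := pvFoldB_spec n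
    ((PySem.List.pyRange 1 ((pvKLoop n 1 : Int) + 1) 1).foldl pvStepP
      (List.replicate (pvKLoop n 1 + 1) 0))
    (pvKLoop n 1) hgetP (pvKLoop n 1 - 1) 0 (by omega) PySem.Set.empty List.nodup_nil
  push_cast at hnB hmB
  norm_num at hnB hmB
  have hmemiff : ∀ x, x ∈ sums_of_squares n ↔
      x ∈ (PySem.List.pyRange 1 ((pvKLoop n 1 : Int)) 1).foldl
        (fun sums a => pvInnerB n
          ((PySem.List.pyRange 1 ((pvKLoop n 1 : Int) + 1) 1).foldl pvStepP
            (List.replicate (pvKLoop n 1 + 1) 0))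
          a (PySem.List.pyRange (a + 1) ((pvKLoop n 1 : Int) + 1) 1) sums)
        ([] : PySem.Set Int) := by
    intro x
    rw [hmA x, hmB x]
    unfold InS
    constructor
    · rintro ⟨c, b, hcb, rfl, hxn⟩
      have hbK : b ≤ pvKLoop n 1 := by
        by_contra hgt
        have hlow := SS_sub_lower_top c b hcb
        have hb : ((pvKLoop n 1 : Int) + 1) ≤ (b : Int) := by exact_mod_cast (by omega : pvKLoop n 1 + 1 ≤ b)
        have hKnn : (0 : Int) ≤ (pvKLoop n 1 : Int) := Int.natCast_nonneg _
        have h1 : ((pvKLoop n 1 : Int)) ^ 2 ≤ ((b : Int) - 1) ^ 2 := by nlinarith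
        have h2 : ((pvKLoop n 1 : Int) + 1) ^ 2 ≤ (b : Int) ^ 2 := by nlinarith
        omega
      exact ⟨c, b, hcb, hbK, rfl, hxn⟩
    · rintro ⟨c, b, hcb, hbK, rfl, hxn⟩
      exact ⟨c, b, hcb, rfl, hxn⟩
  have hnA : (sums_of_squares n).Nodup := hpA.imp (fun h => ne_of_lt h)
  have hperm := (List.perm_ext_iff_of_nodup hnA hnB).mpr hmemiff
  have hsorted := PySem.List.sorted_eq_of_perm_of_pairwise_lt _ (sums_of_squares n)
    (fun x => x) hperm hpA
  rw [show sums_of_squares_alt n = PySem.List.sorted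
    ((PySem.List.pyRange 1 ((pvKLoop n 1 : Int)) 1).foldl
      (fun sums a => pvInnerB n
        ((PySem.List.pyRange 1 ((pvKLoop n 1 : Int) + 1) 1).foldl pvStepP
          (List.replicate (pvKLoop n 1 + 1) 0))
        a (PySem.List.pyRange (a + 1) ((pvKLoop n 1 : Int) + 1) 1) sums)
      ([] : PySem.Set Int)) (fun x => x) false from rfl]
  exact hsorted.symm
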